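-- pv_equiv track=rewrite | github.com/HaykSahakyan11/Machine_Learning_2 | practical_3/Lucky Numbers.py | is_lucky_num_2
-- ===== SOURCE A (Python) =====
-- def is_lucky_num_2(n):
--     odd, even = 0, 0
--     while n > 0:
--         odd += n % 10
--         n //= 10
--         even += n % 10
--         n //= 10
--     return odd == even
-- ===== SOURCE B (Python) =====
-- def is_lucky_num_2(n):
--     if n <= 0:
--         return True  # no digits: both sums are 0
--     s1 = s2 = 0
--     for i, ch in enumerate(str(n)):
--         d = ord(ch) - 48
--         if i % 2 == 0:
--             s1 += d
--         else:
--             s2 += d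
--     return s1 == s2
-- ===== Notes on version B (the rewrite author's own statement) =====
-- stated objective: idiomatic
-- what changed: B walks the decimal string representation left-to-right with enumerate, partitioning digit values by index parity, instead of A's arithmetic loop peeling two digits per iteration with % and //; the parity partition is symmetric, so direction does not matter.
import Mathlib
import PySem

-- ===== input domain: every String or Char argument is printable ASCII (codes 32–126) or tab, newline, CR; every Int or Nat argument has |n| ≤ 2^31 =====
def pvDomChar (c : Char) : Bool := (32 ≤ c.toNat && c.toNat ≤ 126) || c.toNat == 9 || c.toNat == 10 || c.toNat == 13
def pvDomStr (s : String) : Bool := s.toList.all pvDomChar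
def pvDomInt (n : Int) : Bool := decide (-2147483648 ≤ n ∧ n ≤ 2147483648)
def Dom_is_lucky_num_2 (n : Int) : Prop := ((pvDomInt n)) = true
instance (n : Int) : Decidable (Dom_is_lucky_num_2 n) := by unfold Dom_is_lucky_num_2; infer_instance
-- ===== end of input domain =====

-- B re-implements the alternating digit-sum check by walking the decimal string representation
-- with enumerate (index-parity partition) instead of A's arithmetic two-digits-per-iteration
-- peeling loop (idiomatic; same cost).


-- ===== PORT A =====
-- A's while loop: 'odd'/'even' accumulate n % 10 after zero resp. one 'n //= 10' step,
-- two digits peeled per iteration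
def luckyLoopA (n odd even : Int) : Bool :=
  if h : 0 < n then
    let odd' := odd + PySem.Int.mod n 10
    let n1 := PySem.Int.floordiv n 10
    let even' := even + PySem.Int.mod n1 10
    let n2 := PySem.Int.floordiv n1 10
    luckyLoopA n2 odd' even'
  else
    decide (odd = even)
termination_by n.toNat
decreasing_by
  have h10 : PySem.Int.floordiv n 10 = n / 10 := PySem.Int.floordiv_eq_ediv_of_pos (by omega)
  have h100 : PySem.Int.floordiv (n / 10) 10 = n / 10 / 10 :=
    PySem.Int.floordiv_eq_ediv_of_pos (by omega)
  simp only [h10, h100]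
  have h1 : n / 10 ≤ n := Int.ediv_le_self 10 (le_of_lt h)
  have h1' : n / 10 ≠ n := by
    intro he
    have hdm := Int.mul_ediv_add_emod n 10
    have hr := Int.emod_nonneg n (by norm_num : (10:Int) ≠ 0)
    omega
  have h2 : 0 ≤ n / 10 := Int.ediv_nonneg (by omega) (by omega)
  have h3 : n / 10 / 10 ≤ n / 10 := Int.ediv_le_self 10 h2
  omega

def is_lucky_num_2 (n : Int) : Bool := luckyLoopA n 0 0

-- ===== PORT B =====
-- Source B: guard n <= 0, then one pass over enumerate(str(n)) adding ord(ch) - 48 to s1 at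
-- even indices and to s2 at odd indices; the (s1, s2) pair is the fold state
def is_lucky_num_2_alt (n : Int) : Bool :=
  if n ≤ 0 then true
  else
    let p := (PySem.List.enumerate (PySem.Int.toStr n).toList 0).foldl
      (fun (ab : Int × Int) (ic : Int × Char) =>
        if PySem.Int.mod ic.1 2 == 0 then (ab.1 + ((ic.2.toNat : Int) - 48), ab.2)
        else (ab.1, ab.2 + ((ic.2.toNat : Int) - 48)))
      (0, 0)
    decide (p.1 = p.2)

-- ===== PRECONDITION & SPEC =====
def Spec_is_lucky_num_2 (n : Int) (out : Bool) : Prop := out = is_lucky_num_2_alt n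
instance (n : Int) (out : Bool) : Decidable (Spec_is_lucky_num_2 n out) := by unfold Spec_is_lucky_num_2; infer_instance

-- ===== CLAIM (what is proved, stated in full; the proofs are below) =====
def Claim_equal_is_lucky_num_2 : Prop := ∀ (n : Int), Dom_is_lucky_num_2 n → Spec_is_lucky_num_2 n (is_lucky_num_2 n)

-- ===== LEMMAS AND PROOFS =====

-- front-based index-parity sums of a (Nat) digit list: .1 = even positions, .2 = odd positions
def epair : List Nat → Int × Int
  | [] => (0, 0)
  | d :: l => ((d : Int) + (epair l).2, (epair l).1)

-- the same parity sums over the digit VALUES (code point - 48) of a character list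
def cpair : List Char → Int × Int
  | [] => (0, 0)
  | c :: l => (((c.toNat : Int) - 48) + (cpair l).2, (cpair l).1)

-- A's loop computes the parity sums of the little-endian digit list of m
lemma luckyLoopA_eq (m : Nat) : ∀ (odd even : Int),
    luckyLoopA (m : Int) odd even =
      decide (odd + (epair (Nat.digits 10 m)).1 = even + (epair (Nat.digits 10 m)).2) := by
  induction m using Nat.strong_induction_on with
  | _ m ih =>
    intro odd even
    rcases Nat.eq_zero_or_pos m with rfl | hm
    · rw [luckyLoopA]
      simp [epair]
    · rw [luckyLoopA]
      rw [dif_pos (by exact_mod_cast hm)]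
      have hmod : PySem.Int.mod (m : Int) 10 = ((m % 10 : Nat) : Int) := by
        exact_mod_cast PySem.Int.mod_natCast m 10
      have hdiv : PySem.Int.floordiv (m : Int) 10 = ((m / 10 : Nat) : Int) := by
        exact_mod_cast PySem.Int.floordiv_natCast m 10
      have hmod2 : PySem.Int.mod ((m / 10 : Nat) : Int) 10 = ((m / 10 % 10 : Nat) : Int) := by
        exact_mod_cast PySem.Int.mod_natCast (m / 10) 10
      have hdiv2 : PySem.Int.floordiv ((m / 10 : Nat) : Int) 10 = ((m / 10 / 10 : Nat) : Int) := by
        exact_mod_cast PySem.Int.floordiv_natCast (m / 10) 10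
      simp only [hmod, hdiv, hmod2, hdiv2]
      rw [ih (m / 10 / 10) (by
        have := Nat.div_lt_self hm (by norm_num : 1 < 10)
        have := Nat.div_le_self (m / 10) 10
        omega)]
      have hdig : Nat.digits 10 m = m % 10 :: Nat.digits 10 (m / 10) :=
        Nat.digits_def' (by norm_num) hm
      by_cases h0 : m / 10 = 0
      · rw [hdig, h0]
        simp [epair]
      · have hdig2 : Nat.digits 10 (m / 10) = m / 10 % 10 :: Nat.digits 10 (m / 10 / 10) :=
          Nat.digits_def' (by norm_num) (Nat.pos_of_ne_zero h0)
        rw [hdig, hdig2]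
        simp only [epair]
        rw [decide_eq_decide]
        omega

-- core's toDigitsCore (with enough fuel) is the big-endian digit characters of m
lemma toDigitsCore_eq (fuel : Nat) : ∀ (m : Nat) (acc : List Char), 0 < m → m ≤ fuel →
    Nat.toDigitsCore 10 fuel m acc =
      ((Nat.digits 10 m).reverse.map Nat.digitChar) ++ acc := by
  induction fuel with
  | zero => intro m acc hm hf; omega
  | succ f ih =>
    intro m acc hm hf
    rw [Nat.toDigitsCore]
    have hdig : Nat.digits 10 m = m % 10 :: Nat.digits 10 (m / 10) :=
      Nat.digits_def' (by norm_num) hm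
    by_cases h0 : m / 10 = 0
    · simp [h0, hdig]
    · have hm' : 0 < m / 10 := Nat.pos_of_ne_zero h0
      have hle : m / 10 ≤ f := by
        have := Nat.div_lt_self hm (by norm_num : 1 < 10)
        omega
      rw [if_neg h0, ih (m / 10) _ hm' hle, hdig]
      simp

-- B's fold over enumerate computes cpair, with the two components swapped when the start
-- index is odd
lemma foldB_eq (cs : List Char) : ∀ (s a b : Int), 0 ≤ s →
    (PySem.List.enumerate cs s).foldl
      (fun (ab : Int × Int) (ic : Int × Char) =>
        if PySem.Int.mod ic.1 2 == 0 then (ab.1 + ((ic.2.toNat : Int) - 48), ab.2)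
        else (ab.1, ab.2 + ((ic.2.toNat : Int) - 48)))
      (a, b) =
      (if s % 2 = 0 then (a + (cpair cs).1, b + (cpair cs).2)
       else (a + (cpair cs).2, b + (cpair cs).1)) := by
  induction cs with
  | nil => intro s a b hs; simp [PySem.List.enumerate_nil, cpair]
  | cons c l ih =>
    intro s a b hs
    rw [PySem.List.enumerate_cons, List.foldl_cons]
    have hmod : PySem.Int.mod s 2 = s % 2 := PySem.Int.mod_eq_emod_of_pos (by norm_num)
    by_cases h0 : s % 2 = 0
    · have hb : (PySem.Int.mod s 2 == 0) = true := by simp [hmod, h0]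
      simp only [hb, if_pos]
      rw [ih (s+1) _ _ (by omega)]
      have h1 : (s + 1) % 2 ≠ 0 := by omega
      simp [h0, h1, cpair]
      ring
    · have hb : (PySem.Int.mod s 2 == 0) = false := by simp [hmod, h0]
      simp only [hb, Bool.false_eq_true, if_false]
      rw [ih (s+1) _ _ (by omega)]
      have h1 : (s + 1) % 2 = 0 := by omega
      simp [h0, h1, cpair]
      ring

lemma cpair_map_digitChar (ds : List Nat) (h : ∀ d ∈ ds, d < 10) :
    cpair (ds.map Nat.digitChar) = epair ds := by
  induction ds with
  | nil => rfl
  | cons d l ih =>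
    have hd : d < 10 := h d (by simp)
    have hv : ((Nat.digitChar d).toNat : Int) - 48 = (d : Int) := by
      interval_cases d <;> decide
    simp [cpair, epair, List.map, ih (fun x hx => h x (by simp [hx])), hv]

lemma epair_append_singleton (u : List Nat) (d : Nat) :
    epair (u ++ [d]) =
      (if u.length % 2 = 0 then ((epair u).1 + (d : Int), (epair u).2)
       else ((epair u).1, (epair u).2 + (d : Int))) := by
  induction u with
  | nil => simp [epair]
  | cons x t ih =>
    simp only [List.cons_append, epair, ih, List.length_cons]
    rcases Nat.even_or_odd t.length with he | ho
    · have h0 : t.length % 2 = 0 := Nat.even_iff.mp he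
      have h1 : (t.length + 1) % 2 = 1 := by omega
      simp [h0, h1]
    · have h0 : t.length % 2 = 1 := Nat.odd_iff.mp ho
      have h1 : (t.length + 1) % 2 = 0 := by omega
      simp [h0, h1]
      ring

-- reversal swaps the two parity sums when the length is even and fixes them when it is odd
lemma epair_reverse (l : List Nat) :
    epair l.reverse = (if l.length % 2 = 0 then ((epair l).2, (epair l).1) else epair l) := by
  induction l with
  | nil => simp [epair]
  | cons x t ih =>
    rw [List.reverse_cons, epair_append_singleton, ih]
    simp only [List.length_reverse, List.length_cons, epair]
    rcases Nat.even_or_odd t.length with he | ho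
    · have h0 : t.length % 2 = 0 := Nat.even_iff.mp he
      have h1 : (t.length + 1) % 2 = 1 := by omega
      simp [h0, h1]
      ring
    · have h0 : t.length % 2 = 1 := Nat.odd_iff.mp ho
      have h1 : (t.length + 1) % 2 = 0 := by omega
      simp [h0, h1]
      ring

-- ===== VERDICT (by name: the statement is the Claim_ definition above) =====
theorem is_lucky_num_2_spec : Claim_equal_is_lucky_num_2 := by
  intro n _
  unfold Spec_is_lucky_num_2 is_lucky_num_2 is_lucky_num_2_alt
  by_cases hn : n ≤ 0
  · rw [luckyLoopA, dif_neg (by omega), if_pos hn]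
    decide
  · rw [if_neg hn]
    have hpos : 0 < n := by omega
    set m := n.toNat with hm
    have hmn : (m : Int) = n := Int.toNat_of_nonneg (by omega)
    have hm0 : 0 < m := by omega
    -- character list of str(n)
    have hchars : (PySem.Int.toStr n).toList =
        (Nat.digits 10 m).reverse.map Nat.digitChar := by
      rw [PySem.Int.toList_toStr]
      simp only [PySem.Int.toChars, if_neg (by omega : ¬ n < 0)]
      rw [Nat.toDigits, toDigitsCore_eq (m + 1) m [] hm0 (by omega)]
      simp
    rw [hchars, foldB_eq _ 0 0 0 le_rfl]
    have hcp : cpair ((Nat.digits 10 m).reverse.map Nat.digitChar) =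
        epair (Nat.digits 10 m).reverse :=
      cpair_map_digitChar _ (fun d hd =>
        Nat.digits_lt_base (by norm_num) (List.mem_reverse.mp hd))
    rw [← hmn, luckyLoopA_eq m 0 0]
    simp only [if_pos (by norm_num : (0:Int) % 2 = 0), hcp, epair_reverse]
    by_cases hlen : (Nat.digits 10 m).length % 2 = 0
    · simp only [if_pos hlen]
      rw [decide_eq_decide]
      omega
    · simp only [if_neg hlen]
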